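-- pv_equiv track=rewrite | github.com/yiiidiii/Process-Mining | lib/alpha_miner/miner.py | summarize_regarding_unrelated_set
-- ===== SOURCE A (Python) =====
-- def summarize_regarding_unrelated_set(tuple_list, disjoint_unrelated_set, mode):
--     result = []
--     if mode == 1:
--         map_result = [False] * len(tuple_list)
--
--         for i in range(len(tuple_list) - 1):
--             for j in range(i + 1, len(tuple_list)):
--                 if tuple_list[i][0] == tuple_list[j][0] and any([set(tuple_list[i][1]).issubset(dis) and set(tuple_list[j][1]).issubset(dis) for dis in disjoint_unrelated_set]):
--                     result.append((tuple_list[i][0], tuple_list[i][1].union(tuple_list[j][1])))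
--                     map_result[i] = True
--                     map_result[j] = True
--
--             # if element i could not be summarized with any other element
--             if not map_result[i]:
--                 result.append(tuple_list[i])
--                 map_result[i] = True
--
--         # for last element in list
--         if not map_result[len(tuple_list) - 1]:
--             result.append(tuple_list[len(tuple_list) - 1])
--
--     if mode == 0:
--         map_result = [False] * len(tuple_list)
--
--         for i in range(len(tuple_list) - 1):
--             for j in range(i + 1, len(tuple_list)):
--                 if tuple_list[i][1] == tuple_list[j][1] and any([set(tuple_list[i][0]).issubset(dis) and set(tuple_list[j][0]).issubset(dis) for dis in disjoint_unrelated_set]):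
--                     result.append((tuple_list[i][0].union(tuple_list[j][0]), tuple_list[i][1]))
--                     map_result[i] = True
--                     map_result[j] = True
--
--             if not map_result[i]:
--                 result.append(tuple_list[i])
--                 map_result[i] = True
--
--         if not map_result[len(tuple_list) - 1]:
--             result.append(tuple_list[len(tuple_list) - 1])
--
--     return result
-- ===== SOURCE B (Python) =====
-- def summarize_regarding_unrelated_set(tuple_list, disjoint_unrelated_set, mode):
--     if mode != 0 and mode != 1:
--         return []
--     n = len(tuple_list)
--     if mode == 1:
--         keys = [t[0] for t in tuple_list]
--         vals = [t[1] for t in tuple_list]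
--     else:
--         keys = [t[1] for t in tuple_list]
--         vals = [t[0] for t in tuple_list]
--     # precompute, for each element, the set of indices of disjoint sets containing its mergeable part
--     cover = [{k for k, dis in enumerate(disjoint_unrelated_set) if v <= dis} for v in vals]
--     result = []
--     used = [False] * n
--     for i in range(n - 1):
--         ki = keys[i]
--         for j in range(i + 1, n):
--             if ki == keys[j] and not cover[i].isdisjoint(cover[j]):
--                 u = vals[i] | vals[j]
--                 result.append((ki, u) if mode == 1 else (u, ki))
--                 used[i] = used[j] = True
--         if not used[i]:
--             result.append(tuple_list[i])
--             used[i] = True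
--     if n > 0 and not used[n - 1]:
--         result.append(tuple_list[n - 1])
--     return result
-- ===== Notes on version B (the rewrite author's own statement) =====
-- stated objective: alternative
-- what changed: B precomputes, once per element, the set of indices of disjoint sets containing its mergeable part, so the per-pair 'some disjoint set contains both' test becomes one set-intersection check instead of rescanning every disjoint set with two subset tests, and A's two copied mode branches collapse into one parametrized pass.
import Mathlib
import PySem

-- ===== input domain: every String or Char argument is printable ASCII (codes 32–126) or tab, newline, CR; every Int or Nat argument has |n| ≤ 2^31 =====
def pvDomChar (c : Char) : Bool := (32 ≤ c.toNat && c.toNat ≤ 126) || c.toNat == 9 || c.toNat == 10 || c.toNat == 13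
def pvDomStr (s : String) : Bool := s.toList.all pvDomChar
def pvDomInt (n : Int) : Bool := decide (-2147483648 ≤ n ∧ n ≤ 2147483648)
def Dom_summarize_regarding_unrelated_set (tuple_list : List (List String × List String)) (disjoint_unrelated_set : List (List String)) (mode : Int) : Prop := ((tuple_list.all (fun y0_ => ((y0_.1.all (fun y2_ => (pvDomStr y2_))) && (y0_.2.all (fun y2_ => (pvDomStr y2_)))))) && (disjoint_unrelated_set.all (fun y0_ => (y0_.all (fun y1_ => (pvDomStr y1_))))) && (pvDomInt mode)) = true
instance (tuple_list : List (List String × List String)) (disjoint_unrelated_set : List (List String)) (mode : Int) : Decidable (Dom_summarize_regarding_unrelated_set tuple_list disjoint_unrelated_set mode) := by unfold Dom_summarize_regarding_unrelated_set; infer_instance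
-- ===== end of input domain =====

-- B replaces A's per-pair rescan of all disjoint sets by precomputed covering-index sets
-- intersected per pair, one pass for both modes; A raises on empty input (excluded by Pre_).


-- ===== PORT A =====
-- Python's `any([set(vi).issubset(dis) and set(vj).issubset(dis) for dis in D])`
def pvAnyBoth (vi vj : List String) (D : List (List String)) : Bool :=
  (D.map (fun dis => PySem.Set.issubset (PySem.Set.ofList vi) dis &&
                     PySem.Set.issubset (PySem.Set.ofList vj) dis)).any id

def summarize_regarding_unrelated_set (tuple_list : List (List String × List String)) (disjoint_unrelated_set : List (List String)) (mode : Int) : List (List String × List String) :=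
  let result : List (List String × List String) := []
  let n : Int := tuple_list.length
  -- `if mode == 1:` block
  let result :=
    if mode == 1 then
      let s := (PySem.List.pyRange 0 (n - 1) 1).foldl
        (fun (s : List (List String × List String) × List Bool) i =>
          let s2 := (PySem.List.pyRange (i + 1) n 1).foldl
            (fun (s : List (List String × List String) × List Bool) j =>
              if PySem.Set.equal (PySem.List.pyGetD tuple_list i ([], [])).1 (PySem.List.pyGetD tuple_list j ([], [])).1 &&
                 pvAnyBoth (PySem.List.pyGetD tuple_list i ([], [])).2 (PySem.List.pyGetD tuple_list j ([], [])).2 disjoint_unrelated_set then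
                (s.1 ++ [((PySem.List.pyGetD tuple_list i ([], [])).1,
                          PySem.Set.union (PySem.List.pyGetD tuple_list i ([], [])).2 (PySem.List.pyGetD tuple_list j ([], [])).2)],
                 PySem.List.pySetD (PySem.List.pySetD s.2 i true) j true)
              else s) s
          if !(PySem.List.pyGetD s2.2 i false) then
            (s2.1 ++ [PySem.List.pyGetD tuple_list i ([], [])], PySem.List.pySetD s2.2 i true)
          else s2)
        (result, List.replicate tuple_list.length false)
      if !(PySem.List.pyGetD s.2 (n - 1) false) then s.1 ++ [PySem.List.pyGetD tuple_list (n - 1) ([], [])] else s.1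
    else result
  -- `if mode == 0:` block
  if mode == 0 then
    let s := (PySem.List.pyRange 0 (n - 1) 1).foldl
      (fun (s : List (List String × List String) × List Bool) i =>
        let s2 := (PySem.List.pyRange (i + 1) n 1).foldl
          (fun (s : List (List String × List String) × List Bool) j =>
            if PySem.Set.equal (PySem.List.pyGetD tuple_list i ([], [])).2 (PySem.List.pyGetD tuple_list j ([], [])).2 &&
               pvAnyBoth (PySem.List.pyGetD tuple_list i ([], [])).1 (PySem.List.pyGetD tuple_list j ([], [])).1 disjoint_unrelated_set then
              (s.1 ++ [(PySem.Set.union (PySem.List.pyGetD tuple_list i ([], [])).1 (PySem.List.pyGetD tuple_list j ([], [])).1,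
                        (PySem.List.pyGetD tuple_list i ([], [])).2)],
               PySem.List.pySetD (PySem.List.pySetD s.2 i true) j true)
            else s) s
        if !(PySem.List.pyGetD s2.2 i false) then
          (s2.1 ++ [PySem.List.pyGetD tuple_list i ([], [])], PySem.List.pySetD s2.2 i true)
        else s2)
      (result, List.replicate tuple_list.length false)
    if !(PySem.List.pyGetD s.2 (n - 1) false) then s.1 ++ [PySem.List.pyGetD tuple_list (n - 1) ([], [])] else s.1
  else result

-- ===== PORT B =====
-- `{k for k, dis in enumerate(disjoint_unrelated_set) if v <= dis}`
def pvCover (v : List String) (D : List (List String)) : PySem.Set Int :=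
  PySem.Set.ofList (((PySem.List.enumerate D).filter (fun p => PySem.Set.issubset v p.2)).map (fun p => p.1))

def summarize_regarding_unrelated_set_alt (tuple_list : List (List String × List String)) (disjoint_unrelated_set : List (List String)) (mode : Int) : List (List String × List String) :=
  if !(mode == 0) && !(mode == 1) then []
  else
    let n : Int := tuple_list.length
    let keys := if mode == 1 then tuple_list.map (fun t => t.1) else tuple_list.map (fun t => t.2)
    let vals := if mode == 1 then tuple_list.map (fun t => t.2) else tuple_list.map (fun t => t.1)
    let cover := vals.map (fun v => pvCover v disjoint_unrelated_set)
    let s := (PySem.List.pyRange 0 (n - 1) 1).foldl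
      (fun (s : List (List String × List String) × List Bool) i =>
        let s2 := (PySem.List.pyRange (i + 1) n 1).foldl
          (fun (s : List (List String × List String) × List Bool) j =>
            if PySem.Set.equal (PySem.List.pyGetD keys i []) (PySem.List.pyGetD keys j []) &&
               !(PySem.Set.isdisjoint (PySem.List.pyGetD cover i []) (PySem.List.pyGetD cover j [])) then
              (s.1 ++ [if mode == 1 then
                         (PySem.List.pyGetD keys i [], PySem.Set.union (PySem.List.pyGetD vals i []) (PySem.List.pyGetD vals j []))
                       else
                         (PySem.Set.union (PySem.List.pyGetD vals i []) (PySem.List.pyGetD vals j []), PySem.List.pyGetD keys i [])],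
               PySem.List.pySetD (PySem.List.pySetD s.2 i true) j true)
            else s) s
        if !(PySem.List.pyGetD s2.2 i false) then
          (s2.1 ++ [PySem.List.pyGetD tuple_list i ([], [])], PySem.List.pySetD s2.2 i true)
        else s2)
      (([] : List (List String × List String)), List.replicate tuple_list.length false)
    if decide (0 < n) && !(PySem.List.pyGetD s.2 (n - 1) false) then
      s.1 ++ [PySem.List.pyGetD tuple_list (n - 1) ([], [])]
    else s.1

-- ===== PRECONDITION & SPEC =====
-- Pre_ excludes only the empty tuple_list with mode 0 or 1, on which A raises IndexError (map_result[-1]).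
def Pre_summarize_regarding_unrelated_set (tuple_list : List (List String × List String)) (disjoint_unrelated_set : List (List String)) (mode : Int) : Prop :=
  tuple_list ≠ [] ∨ (mode ≠ 0 ∧ mode ≠ 1)
instance (tuple_list : List (List String × List String)) (disjoint_unrelated_set : List (List String)) (mode : Int) : Decidable (Pre_summarize_regarding_unrelated_set tuple_list disjoint_unrelated_set mode) := by unfold Pre_summarize_regarding_unrelated_set; infer_instance

def pvWitness_summarize_regarding_unrelated_set : (List (List String × List String)) × List (List String) × Int :=
  ([(["a"], ["b"]), (["a"], ["c"])], [["b", "c"]], 1)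

def Spec_summarize_regarding_unrelated_set (tuple_list : List (List String × List String)) (disjoint_unrelated_set : List (List String)) (mode : Int) (out : List (List String × List String)) : Prop := out = summarize_regarding_unrelated_set_alt tuple_list disjoint_unrelated_set mode
instance (tuple_list : List (List String × List String)) (disjoint_unrelated_set : List (List String)) (mode : Int) (out : List (List String × List String)) : Decidable (Spec_summarize_regarding_unrelated_set tuple_list disjoint_unrelated_set mode out) := by unfold Spec_summarize_regarding_unrelated_set; infer_instance

-- ===== CLAIM (what is proved, stated in full; the proofs are below) =====
def Claim_equal_summarize_regarding_unrelated_set : Prop := ∀ (tuple_list : List (List String × List String)) (disjoint_unrelated_set : List (List String)) (mode : Int), Dom_summarize_regarding_unrelated_set tuple_list disjoint_unrelated_set mode → Pre_summarize_regarding_unrelated_set tuple_list disjoint_unrelated_set mode → Spec_summarize_regarding_unrelated_set tuple_list disjoint_unrelated_set mode (summarize_regarding_unrelated_set tuple_list disjoint_unrelated_set mode)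

-- ===== LEMMAS AND PROOFS =====

lemma pv_issubset_ofList (v t : List String) :
    PySem.Set.issubset (PySem.Set.ofList v) t = PySem.Set.issubset v t := by
  rw [Bool.eq_iff_iff, PySem.Set.issubset_iff, PySem.Set.issubset_iff]
  constructor
  · intro h x hx; exact h x ((PySem.Set.mem_ofList _ _).mpr hx)
  · intro h x hx; exact h x ((PySem.Set.mem_ofList _ _).mp hx)

lemma pv_mem_cover (x : Int) (v : List String) (D : List (List String)) :
    x ∈ pvCover v D ↔ ∃ (k : Nat) (h : k < D.length), x = (k : Int) ∧ PySem.Set.issubset v D[k] = true := by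
  unfold pvCover
  rw [PySem.Set.mem_ofList _ _]
  simp only [List.mem_map, List.mem_filter]
  constructor
  · rintro ⟨p, ⟨hmem, hsub⟩, hx⟩
    rcases (PySem.List.mem_enumerate_iff _ _ _).mp hmem with ⟨k, hk, hp⟩
    subst hp
    exact ⟨k, hk, by simpa using hx.symm, hsub⟩
  · rintro ⟨k, hk, hx, hsub⟩
    refine ⟨((k : Int), D[k]), ⟨(PySem.List.mem_enumerate_iff _ _ _).mpr ⟨k, hk, by simp⟩, hsub⟩, hx.symm⟩

lemma pv_any_eq_cover (vi vj : List String) (D : List (List String)) :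
    pvAnyBoth vi vj D = !(PySem.Set.isdisjoint (pvCover vi D) (pvCover vj D)) := by
  rw [Bool.eq_iff_iff]
  unfold pvAnyBoth
  simp only [List.any_map, List.any_eq_true, Function.comp, id, Bool.and_eq_true,
    pv_issubset_ofList, Bool.not_eq_true', Bool.eq_false_iff, Ne, PySem.Set.isdisjoint_iff]
  push_neg
  constructor
  · rintro ⟨dis, hdis, h1, h2⟩
    rcases List.mem_iff_getElem.mp hdis with ⟨k, hk, rfl⟩
    exact ⟨(k : Int), (pv_mem_cover _ _ _).mpr ⟨k, hk, rfl, h1⟩, (pv_mem_cover _ _ _).mpr ⟨k, hk, rfl, h2⟩⟩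
  · rintro ⟨x, hxi, hxj⟩
    rcases (pv_mem_cover _ _ _).mp hxi with ⟨k, hk, rfl, h1⟩
    rcases (pv_mem_cover _ _ _).mp hxj with ⟨m, hm, hkm, h2⟩
    have : k = m := by exact_mod_cast hkm
    subst this
    exact ⟨D[k], List.getElem_mem hk, h1, h2⟩


-- A's generic pass (key/value projections and pair orientation abstracted) and B's pass.
def pvFoldA (tl : List (List String × List String)) (D : List (List String))
    (key val : List String × List String → List String)
    (mk : List String → List String → List String × List String)
    (init : List (List String × List String) × List Bool) :
    List (List String × List String) × List Bool :=
  (PySem.List.pyRange 0 ((tl.length : Int) - 1) 1).foldl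
    (fun (s : List (List String × List String) × List Bool) i =>
      let s2 := (PySem.List.pyRange (i + 1) (tl.length : Int) 1).foldl
        (fun (s : List (List String × List String) × List Bool) j =>
          if PySem.Set.equal (key (PySem.List.pyGetD tl i ([], []))) (key (PySem.List.pyGetD tl j ([], []))) &&
             pvAnyBoth (val (PySem.List.pyGetD tl i ([], []))) (val (PySem.List.pyGetD tl j ([], []))) D then
            (s.1 ++ [mk (key (PySem.List.pyGetD tl i ([], [])))
                        (PySem.Set.union (val (PySem.List.pyGetD tl i ([], []))) (val (PySem.List.pyGetD tl j ([], []))))],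
             PySem.List.pySetD (PySem.List.pySetD s.2 i true) j true)
          else s) s
      if !(PySem.List.pyGetD s2.2 i false) then
        (s2.1 ++ [PySem.List.pyGetD tl i ([], [])], PySem.List.pySetD s2.2 i true)
      else s2) init

def pvFoldB (tl : List (List String × List String)) (D : List (List String))
    (key val : List String × List String → List String)
    (mk : List String → List String → List String × List String)
    (init : List (List String × List String) × List Bool) :
    List (List String × List String) × List Bool :=
  (PySem.List.pyRange 0 ((tl.length : Int) - 1) 1).foldl
    (fun (s : List (List String × List String) × List Bool) i =>
      let s2 := (PySem.List.pyRange (i + 1) (tl.length : Int) 1).foldl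
        (fun (s : List (List String × List String) × List Bool) j =>
          if PySem.Set.equal (PySem.List.pyGetD (tl.map key) i []) (PySem.List.pyGetD (tl.map key) j []) &&
             !(PySem.Set.isdisjoint (PySem.List.pyGetD ((tl.map val).map (fun v => pvCover v D)) i [])
                                    (PySem.List.pyGetD ((tl.map val).map (fun v => pvCover v D)) j [])) then
            (s.1 ++ [mk (PySem.List.pyGetD (tl.map key) i [])
                        (PySem.Set.union (PySem.List.pyGetD (tl.map val) i []) (PySem.List.pyGetD (tl.map val) j []))],
             PySem.List.pySetD (PySem.List.pySetD s.2 i true) j true)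
          else s) s
      if !(PySem.List.pyGetD s2.2 i false) then
        (s2.1 ++ [PySem.List.pyGetD tl i ([], [])], PySem.List.pySetD s2.2 i true)
      else s2) init

lemma pv_pass_eq (tl : List (List String × List String)) (D : List (List String))
    (key val : List String × List String → List String)
    (mk : List String → List String → List String × List String)
    (init : List (List String × List String) × List Bool) :
    pvFoldA tl D key val mk init = pvFoldB tl D key val mk init := by
  unfold pvFoldA pvFoldB
  apply PySem.List.foldl_congr_mem
  intro acc i hi
  rw [PySem.List.mem_pyRange_one] at hi
  have hi0 : 0 ≤ i := hi.1
  have hilt : i < (tl.length : Int) := by omega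
  have hinner : ∀ (s : List (List String × List String) × List Bool),
      (PySem.List.pyRange (i + 1) (tl.length : Int) 1).foldl
        (fun (s : List (List String × List String) × List Bool) j =>
          if PySem.Set.equal (key (PySem.List.pyGetD tl i ([], []))) (key (PySem.List.pyGetD tl j ([], []))) &&
             pvAnyBoth (val (PySem.List.pyGetD tl i ([], []))) (val (PySem.List.pyGetD tl j ([], []))) D then
            (s.1 ++ [mk (key (PySem.List.pyGetD tl i ([], [])))
                        (PySem.Set.union (val (PySem.List.pyGetD tl i ([], []))) (val (PySem.List.pyGetD tl j ([], []))))],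
             PySem.List.pySetD (PySem.List.pySetD s.2 i true) j true)
          else s) s
    = (PySem.List.pyRange (i + 1) (tl.length : Int) 1).foldl
        (fun (s : List (List String × List String) × List Bool) j =>
          if PySem.Set.equal (PySem.List.pyGetD (tl.map key) i []) (PySem.List.pyGetD (tl.map key) j []) &&
             !(PySem.Set.isdisjoint (PySem.List.pyGetD ((tl.map val).map (fun v => pvCover v D)) i [])
                                    (PySem.List.pyGetD ((tl.map val).map (fun v => pvCover v D)) j [])) then
            (s.1 ++ [mk (PySem.List.pyGetD (tl.map key) i [])
                        (PySem.Set.union (PySem.List.pyGetD (tl.map val) i []) (PySem.List.pyGetD (tl.map val) j []))],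
             PySem.List.pySetD (PySem.List.pySetD s.2 i true) j true)
          else s) s := by
    intro s
    apply PySem.List.foldl_congr_mem
    intro acc2 j hj
    rw [PySem.List.mem_pyRange_one] at hj
    have hj0 : 0 ≤ j := by omega
    have hjlt : j < (tl.length : Int) := hj.2
    have hkl : i < ((tl.map key).length : Int) := by simpa using hilt
    have hkl2 : j < ((tl.map key).length : Int) := by simpa using hjlt
    have hvl : i < ((tl.map val).length : Int) := by simpa using hilt
    have hvl2 : j < ((tl.map val).length : Int) := by simpa using hjlt
    have hcl : i < (((tl.map val).map (fun v => pvCover v D)).length : Int) := by simpa using hilt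
    have hcl2 : j < (((tl.map val).map (fun v => pvCover v D)).length : Int) := by simpa using hjlt
    rw [PySem.List.pyGetD_eq_getElem tl ([], []) hi0 hilt, PySem.List.pyGetD_eq_getElem tl ([], []) hj0 hjlt,
        PySem.List.pyGetD_eq_getElem (tl.map key) [] hi0 hkl, PySem.List.pyGetD_eq_getElem (tl.map key) [] hj0 hkl2,
        PySem.List.pyGetD_eq_getElem (tl.map val) [] hi0 hvl, PySem.List.pyGetD_eq_getElem (tl.map val) [] hj0 hvl2,
        PySem.List.pyGetD_eq_getElem ((tl.map val).map (fun v => pvCover v D)) [] hi0 hcl,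
        PySem.List.pyGetD_eq_getElem ((tl.map val).map (fun v => pvCover v D)) [] hj0 hcl2]
    simp only [List.getElem_map, pv_any_eq_cover]
  exact congrArg (fun s2 : List (List String × List String) × List Bool =>
    if !(PySem.List.pyGetD s2.2 i false) then
      (s2.1 ++ [PySem.List.pyGetD tl i ([], [])], PySem.List.pySetD s2.2 i true)
    else s2) (hinner acc)

-- one mode-branch of A equals the corresponding instantiation of B's pass
lemma pv_mode_eq (tl : List (List String × List String)) (D : List (List String))
    (key val : List String × List String → List String)
    (mk : List String → List String → List String × List String)
    (h : tl ≠ []) :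
    (if !(PySem.List.pyGetD (pvFoldA tl D key val mk ([], List.replicate tl.length false)).2 ((tl.length : Int) - 1) false) then
       (pvFoldA tl D key val mk ([], List.replicate tl.length false)).1 ++ [PySem.List.pyGetD tl ((tl.length : Int) - 1) ([], [])]
     else (pvFoldA tl D key val mk ([], List.replicate tl.length false)).1)
  = (if decide ((0 : Int) < (tl.length : Int)) && !(PySem.List.pyGetD (pvFoldB tl D key val mk ([], List.replicate tl.length false)).2 ((tl.length : Int) - 1) false) then
       (pvFoldB tl D key val mk ([], List.replicate tl.length false)).1 ++ [PySem.List.pyGetD tl ((tl.length : Int) - 1) ([], [])]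
     else (pvFoldB tl D key val mk ([], List.replicate tl.length false)).1) := by
  rw [pv_pass_eq]
  have hd : decide ((0 : Int) < (tl.length : Int)) = true := by
    simp only [decide_eq_true_eq]
    exact_mod_cast List.length_pos_iff.mpr h
  rw [hd, Bool.true_and]

-- ===== VERDICT (by name: the statement is the Claim_ definition above) =====
theorem summarize_regarding_unrelated_set_spec : Claim_equal_summarize_regarding_unrelated_set := by
  intro tl D mode _hDom hPre
  unfold Spec_summarize_regarding_unrelated_set
  by_cases h1 : mode = 1
  · subst h1
    have htl : tl ≠ [] := by
      rcases hPre with h | h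
      · exact h
      · exact absurd rfl h.2
    exact pv_mode_eq tl D (fun t => t.1) (fun t => t.2) (fun a b => (a, b)) htl
  · by_cases h0 : mode = 0
    · subst h0
      have htl : tl ≠ [] := by
        rcases hPre with h | h
        · exact h
        · exact absurd rfl h.1
      exact pv_mode_eq tl D (fun t => t.2) (fun t => t.1) (fun a b => (b, a)) htl
    · have e1 : (mode == 1) = false := by simpa using h1
      have e0 : (mode == 0) = false := by simpa using h0
      simp only [summarize_regarding_unrelated_set, summarize_regarding_unrelated_set_alt, e0, e1]
      simp
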